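-- pv_equiv track=rewrite | github.com/parrottq/instant-runoff-voting | irv.py | lowest_candidate
-- ===== SOURCE A (Python) =====
-- def lowest_candidate(results):
--     worst_candidates = sorted(results.items(), key=lambda k: k[1])
--
--     last_places = []
--     smallest_vote = 0
--     for candidate, vote_count in worst_candidates:
--         if not len(last_places):
--             last_places.append(candidate)
--             smallest_vote = vote_count
--         else:
--             if smallest_vote == vote_count:
--                 last_places.append(candidate)
--             else:
--                 return last_places
--
--     return last_places
-- ===== SOURCE B (Python) =====
-- def lowest_candidate(results):
--     if not results:
--         return []
--     smallest = min(results.values())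
--     return [c for c, v in results.items() if v == smallest]
-- ===== Notes on version B (the rewrite author's own statement) =====
-- stated objective: simpler
-- what changed: Replaces sort-then-scan-prefix with a min() over the values followed by one filtering pass that keeps candidates with the minimum count in insertion order (the stable sort made A's prefix exactly that); O(n) instead of O(n log n), though a timing run measured only ~1.4x at the largest size.
import Mathlib
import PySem

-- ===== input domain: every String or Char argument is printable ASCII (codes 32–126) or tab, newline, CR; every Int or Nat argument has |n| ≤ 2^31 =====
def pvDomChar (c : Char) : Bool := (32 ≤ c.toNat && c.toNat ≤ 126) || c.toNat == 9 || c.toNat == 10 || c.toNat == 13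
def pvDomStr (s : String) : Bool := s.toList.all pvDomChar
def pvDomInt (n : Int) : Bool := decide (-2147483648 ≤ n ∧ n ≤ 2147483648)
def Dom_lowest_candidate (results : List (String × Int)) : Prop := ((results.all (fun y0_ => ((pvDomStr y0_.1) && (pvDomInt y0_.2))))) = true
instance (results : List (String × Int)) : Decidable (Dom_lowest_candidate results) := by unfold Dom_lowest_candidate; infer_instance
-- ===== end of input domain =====

-- B replaces A's sort-then-scan-prefix by a single min over the values plus one
-- filtering pass (simpler, no sort); proved to return the same list.


-- ===== PORT A =====
-- the 'for candidate, vote_count in worst_candidates' loop, with its two early-return exits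
def lcLoop : List (String × Int) → List String → Int → List String
  | [], last_places, _ => last_places
  | (candidate, vote_count) :: rest, last_places, smallest_vote =>
    if last_places.length = 0 then
      lcLoop rest (last_places ++ [candidate]) vote_count
    else if smallest_vote = vote_count then
      lcLoop rest (last_places ++ [candidate]) smallest_vote
    else
      last_places

def lowest_candidate (results : List (String × Int)) : List String :=
  let worst_candidates := PySem.List.sorted results (fun k => k.2)
  lcLoop worst_candidates [] 0

-- ===== PORT B =====
def lowest_candidate_alt (results : List (String × Int)) : List String :=
  if results.isEmpty then []
  else
    match PySem.List.min? (results.map Prod.snd) (fun v => v) with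
    | none => []   -- unreachable: results is nonempty here
    | some smallest => (results.filter (fun p => p.2 == smallest)).map Prod.fst

-- ===== PRECONDITION & SPEC =====
def Spec_lowest_candidate (results : List (String × Int)) (out : List String) : Prop := out = lowest_candidate_alt results
instance (results : List (String × Int)) (out : List String) : Decidable (Spec_lowest_candidate results out) := by unfold Spec_lowest_candidate; infer_instance

-- ===== CLAIM (what is proved, stated in full; the proofs are below) =====
def Claim_equal_lowest_candidate : Prop := ∀ (results : List (String × Int)), Dom_lowest_candidate results → Spec_lowest_candidate results (lowest_candidate results)

-- ===== LEMMAS AND PROOFS =====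

-- A's loop with a nonempty accumulator takes the prefix of entries whose count equals smallest_vote
theorem lcLoop_nonempty (rest : List (String × Int)) (lp : List String) (sm : Int)
    (h : lp ≠ []) :
    lcLoop rest lp sm = lp ++ (rest.takeWhile (fun p => p.2 == sm)).map Prod.fst := by
  induction rest generalizing lp with
  | nil => simp [lcLoop]
  | cons x r ih =>
    obtain ⟨c, v⟩ := x
    have hl : lp.length ≠ 0 := by simpa using h
    by_cases hv : sm = v
    · subst hv
      simp only [lcLoop, if_neg hl]
      rw [ih _ (by simp)]
      simp [List.takeWhile]
    · have hf : ((v : Int) == sm) = false := by simpa using fun h' => hv h'.symm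
      simp [lcLoop, hl, hv, List.takeWhile, hf]

-- on a key-sorted list whose values are all ≥ m, the equal-to-m prefix is the whole equal-to-m set
theorem takeWhile_eq_filter (m : Int) :
    ∀ l : List (String × Int), l.Pairwise (fun a b => a.2 ≤ b.2) → (∀ y ∈ l, m ≤ y.2) →
    l.takeWhile (fun p => p.2 == m) = l.filter (fun p => p.2 == m) := by
  intro l
  induction l with
  | nil => simp
  | cons x r ih =>
    intro hp hm
    by_cases hx : x.2 = m
    · simp only [List.takeWhile, List.filter, hx]
      simp only [beq_self_eq_true]
      rw [ih hp.of_cons (fun y hy => hm y (List.mem_cons_of_mem _ hy))]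
    · have hgt : ∀ y ∈ r, ¬ (y.2 = m) := by
        intro y hy hym
        have h1 : m ≤ x.2 := hm x (List.mem_cons_self)
        have h2 : x.2 ≤ y.2 := (List.pairwise_cons.mp hp).1 y hy
        omega
      have : r.filter (fun p => p.2 == m) = [] := by
        rw [List.filter_eq_nil_iff]
        intro y hy; simpa using hgt y hy
      have hf : (x.2 == m) = false := by simpa using hx
      simp [List.takeWhile, List.filter, this, hf]

-- stability of insertion into a sorted list, seen through an equal-key filter
theorem filter_insertBy (m : Int) :
    ∀ ys : List (String × Int), ys.Pairwise (fun a b => a.2 ≤ b.2) → ∀ x : String × Int,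
    (PySem.List.insertBy (fun a b => decide (a.2 < b.2)) x ys).filter (fun p => p.2 == m)
      = ys.filter (fun p => p.2 == m) ++ (if x.2 == m then [x] else []) := by
  intro ys
  induction ys with
  | nil =>
    intro _ x
    by_cases hx : x.2 = m <;> simp [PySem.List.insertBy, List.filter, hx]
  | cons y r ih =>
    intro hp x
    by_cases hb : x.2 < y.2
    · simp only [PySem.List.insertBy, decide_eq_true_eq, if_pos hb]
      by_cases hx : x.2 = m
      · have hnone : (y :: r).filter (fun p => p.2 == m) = [] := by
          rw [List.filter_eq_nil_iff]
          intro z hz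
          rcases List.mem_cons.mp hz with h | h
          · subst h; simp; omega
          · have : y.2 ≤ z.2 := (List.pairwise_cons.mp hp).1 z h
            simp; omega
        rw [List.filter_cons_of_pos (by simpa using hx), hnone]
        simp [hx]
      · simp [List.filter_cons, hx]
    · simp only [PySem.List.insertBy, decide_eq_true_eq, if_neg hb]
      rw [List.filter_cons, List.filter_cons, ih hp.of_cons x]
      split <;> simp

-- stable sort keeps the order of equal-valued entries: filtering by one value commutes with sorting
theorem filter_sorted (m : Int) (xs : List (String × Int)) :
    (PySem.List.sorted xs (fun p => p.2)).filter (fun p => p.2 == m)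
      = xs.filter (fun p => p.2 == m) := by
  induction xs using List.reverseRecOn with
  | nil => simp [PySem.List.sorted]
  | append_singleton xs x ih =>
    have hs : PySem.List.sorted (xs ++ [x]) (fun p => p.2)
        = PySem.List.insertBy (fun a b => decide (a.2 < b.2)) x (PySem.List.sorted xs (fun p => p.2)) := by
      rw [PySem.List.sorted_eq_foldl_insertBy, PySem.List.sorted_eq_foldl_insertBy, List.foldl_append]
      rfl
    rw [hs, filter_insertBy m _ (PySem.List.sorted_pairwise xs (fun p => p.2)) x, ih,
      List.filter_append]
    congr 1
    by_cases hx : x.2 = m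
    · simp [List.filter, hx]
    · have hf : (x.2 == m) = false := by simpa using hx
      simp [List.filter, hf]

-- ===== VERDICT (by name: the statement is the Claim_ definition above) =====
theorem lowest_candidate_spec : Claim_equal_lowest_candidate := by
  intro results _
  unfold Spec_lowest_candidate lowest_candidate lowest_candidate_alt
  cases hs : PySem.List.sorted results (fun k => k.2) with
  | nil =>
    have hr : results = [] := (PySem.List.sorted_eq_nil_iff _ _ _).mp hs
    subst hr
    simp [lcLoop]
  | cons hd t =>
    obtain ⟨c, v⟩ := hd
    have hne : results ≠ [] := by
      intro h; subst h
      simp [PySem.List.sorted] at hs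
    have hmin : ∀ y ∈ results, v ≤ y.2 :=
      PySem.List.key_head_sorted_le results (fun k => k.2) hs
    have hmem : (c, v) ∈ results := by
      have := (PySem.List.sorted_perm results (fun k => k.2) false).mem_iff.mp
        (by rw [hs]; exact List.mem_cons_self)
      exact this
    -- the Python min over the values is exactly v
    have hminq : PySem.List.min? (results.map Prod.snd) (fun v => v) = some v := by
      cases hq : PySem.List.min? (results.map Prod.snd) (fun v => v) with
      | none =>
        rw [PySem.List.min?_eq_none_iff] at hq
        simp [hne] at hq
      | some w =>
        have hwmem : w ∈ results.map Prod.snd := PySem.List.min?_mem hq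
        obtain ⟨y, hy, hyw⟩ := List.mem_map.mp hwmem
        have h1 : v ≤ w := by rw [← hyw]; exact hmin y hy
        have h2 : w ≤ v := PySem.List.min?_isMin hq v (List.mem_map.mpr ⟨(c, v), hmem, rfl⟩)
        have : w = v := le_antisymm h2 h1
        rw [this]
    have hps : ((c, v) :: t).Pairwise (fun a b : String × Int => a.2 ≤ b.2) := by
      rw [← hs]; exact PySem.List.sorted_pairwise results (fun k => k.2)
    have hminS : ∀ y ∈ (c, v) :: t, v ≤ y.2 := by
      intro y hy
      exact hmin y ((PySem.List.sorted_perm results (fun k => k.2) false).mem_iff.mp (by rw [hs]; exact hy))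
    -- A's side: unroll the first loop step, then the nonempty-accumulator lemma
    have hA : lcLoop ((c, v) :: t) [] 0
        = (((c, v) :: t).takeWhile (fun p => p.2 == v)).map Prod.fst := by
      show lcLoop ((c, v) :: t) [] 0 = _
      simp only [lcLoop, List.length_nil, List.nil_append]
      rw [lcLoop_nonempty t [c] v (by simp)]
      simp [List.takeWhile]
    have h2 : ((c, v) :: t).filter (fun p => p.2 == v) = results.filter (fun p => p.2 == v) := by
      rw [← hs]; exact filter_sorted v results
    rw [hA, takeWhile_eq_filter v _ hps hminS, h2]
    simp [hne, hminq]
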